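-- pv_equiv track=rewrite | github.com/cpebble/cademy | main.py | to_base14
-- ===== SOURCE A (Python) =====
-- def to_base14(num):
--     # Define the symbols to represent digits from 10 to 13
--     symbols = {10: 'A', 11: 'B', 12: 'C', 13: 'D'}
--
--     # Start with an empty result
--     result = ''
--
--     while num > 0:
--         digit = num % 14
--         if 10 <= digit <= 13:
--             # Replace 10-13 with A-D
--             result = symbols[digit] + result
--         else:
--             # Prepend the digit to the result
--             result = str(digit) + result
--         # Integer division by 14
--         num = num // 14
--     return result
-- ===== SOURCE B (Python) =====
-- DIGITS = '0123456789ABCD'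
--
-- def to_base14(num):
--     if num <= 0:
--         return ''
--     return to_base14(num // 14) + DIGITS[num % 14]
-- ===== Notes on version B (the rewrite author's own statement) =====
-- stated objective: simpler
-- what changed: Replaces the accumulate-and-prepend while loop with dict/branch digit lookup by a short recursion on the base quotient that appends a digit taken from a constant digit string.
import Mathlib
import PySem

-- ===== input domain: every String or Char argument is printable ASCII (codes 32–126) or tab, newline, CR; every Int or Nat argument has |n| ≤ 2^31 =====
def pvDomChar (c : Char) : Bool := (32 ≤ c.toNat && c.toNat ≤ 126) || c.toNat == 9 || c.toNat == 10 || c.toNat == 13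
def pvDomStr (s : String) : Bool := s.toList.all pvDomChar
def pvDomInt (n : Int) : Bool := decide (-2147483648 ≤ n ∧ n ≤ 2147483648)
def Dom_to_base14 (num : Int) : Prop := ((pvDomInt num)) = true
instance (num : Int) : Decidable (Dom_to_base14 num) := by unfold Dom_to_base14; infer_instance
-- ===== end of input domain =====

-- B replaces A's prepend-accumulator while loop (with a 10..13 symbol dict) by a
-- recursion on the base quotient appending a digit from a constant digit string: simpler decomposition, same cost.

-- ===== PORT A =====
-- port of A's while loop: the accumulator `result` is the List Char of the growing string
def symbols : PySem.Dict Int String :=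
  PySem.Dict.ofList [(10, "A"), (11, "B"), (12, "C"), (13, "D")]

def to_base14Aux (num : Int) (result : List Char) : List Char :=
  if _h : num > 0 then
    let digit := PySem.Int.mod num 14
    let result' :=
      if 10 ≤ digit ∧ digit ≤ 13 then
        ((symbols.get? digit).getD "").toList ++ result
      else
        PySem.Int.toChars digit ++ result
    to_base14Aux (PySem.Int.floordiv num 14) result'
  else result
termination_by num.toNat
decreasing_by
  rw [PySem.Int.floordiv_eq_ediv_of_pos (by omega)]
  omega

def to_base14 (num : Int) : String := String.ofList (to_base14Aux num [])

-- ===== PORT B =====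
def pvDigits : List Char := "0123456789ABCD".toList

def to_base14AltAux (num : Int) : List Char :=
  if _h : num ≤ 0 then []
  else to_base14AltAux (PySem.Int.floordiv num 14) ++
    [(PySem.List.pyGet? pvDigits (PySem.Int.mod num 14)).getD ' ']
termination_by num.toNat
decreasing_by
  rw [PySem.Int.floordiv_eq_ediv_of_pos (by omega)]
  omega

def to_base14_alt (num : Int) : String := String.ofList (to_base14AltAux num)

-- ===== PRECONDITION & SPEC =====
def Spec_to_base14 (num : Int) (out : String) : Prop := out = to_base14_alt num
instance (num : Int) (out : String) : Decidable (Spec_to_base14 num out) := by unfold Spec_to_base14; infer_instance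

-- ===== CLAIM (what is proved, stated in full; the proofs are below) =====
def Claim_equal_to_base14 : Prop := ∀ (num : Int), Dom_to_base14 num → Spec_to_base14 num (to_base14 num)

-- ===== LEMMAS AND PROOFS =====
lemma digit_eq (d : Int) (h0 : 0 ≤ d) (h1 : d < 14) :
    (if 10 ≤ d ∧ d ≤ 13 then ((symbols.get? d).getD "").toList
     else PySem.Int.toChars d)
    = [(PySem.List.pyGet? pvDigits d).getD ' '] := by
  interval_cases d <;> decide

lemma aux_eq (num : Int) (result : List Char) :
    to_base14Aux num result = to_base14AltAux num ++ result := by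
  by_cases h : num > 0
  · rw [to_base14Aux, to_base14AltAux, dif_pos h, dif_neg (not_le.mpr h)]
    have hd := digit_eq (PySem.Int.mod num 14)
      (PySem.Int.mod_nonneg num (by omega)) (PySem.Int.mod_lt num (by omega))
    rw [aux_eq (PySem.Int.floordiv num 14)]
    rw [PySem.Int.mod_eq_emod_of_pos (by omega : (0:Int) < 14)] at hd
    split_ifs at hd ⊢ with hc hc' <;> simp_all
  · rw [to_base14Aux, to_base14AltAux]
    have hle : num ≤ 0 := by omega
    simp [h, hle]
termination_by num.toNat
decreasing_by
  rw [PySem.Int.floordiv_eq_ediv_of_pos (by omega)]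
  omega

-- ===== VERDICT (by name: the statement is the Claim_ definition above) =====
theorem to_base14_spec : Claim_equal_to_base14 := by
  intro num _
  unfold Spec_to_base14 to_base14 to_base14_alt
  rw [aux_eq]
  simp
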